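-- pv_equiv track=rewrite | github.com/adligo/k3d-demo.py.adligo.org | src/label_alignment.py | split_latex_top_level
-- ===== SOURCE A (Python) =====
-- def split_latex_top_level(latex: str) -> list[str]:
--     """Split a LaTeX string at top-level ``=`` and ``+`` operators.
--
--     Operators that appear inside ``{...}`` are *not* split points.
--     Each operator becomes its own element in the output list.
--
--     Example::
--
--         >>> split_latex_top_level("a^{2} + b^{2} = c^{2}")
--         ['a^{2}', '+', 'b^{2}', '=', 'c^{2}']
--     """
--     parts: list[str] = []
--     current: list[str] = []
--     depth = 0
--
--     for ch in latex:
--         if ch == '{':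
--             depth += 1
--             current.append(ch)
--         elif ch == '}':
--             depth -= 1
--             current.append(ch)
--         elif depth == 0 and ch in ('=', '+'):
--             # Flush accumulated text as a part
--             text = "".join(current).strip()
--             if text:
--                 parts.append(text)
--             # The operator itself is a separate part
--             parts.append(ch)
--             current = []
--         else:
--             current.append(ch)
--
--     # Flush remaining text
--     text = "".join(current).strip()
--     if text:
--         parts.append(text)
--
--     return parts
-- ===== SOURCE B (Python) =====
-- def _first_top_level_op(s: str):
--     """Index of the first '=' or '+' outside braces, or None."""
--     depth = 0
--     for i, ch in enumerate(s):
--         if ch == '{':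
--             depth += 1
--         elif ch == '}':
--             depth -= 1
--         elif depth == 0 and ch in ('=', '+'):
--             return i
--     return None
--
--
-- def split_latex_top_level(latex: str) -> list[str]:
--     i = _first_top_level_op(latex)
--     if i is None:
--         t = latex.strip()
--         return [t] if t else []
--     out = []
--     head = latex[:i].strip()
--     if head:
--         out.append(head)
--     out.append(latex[i])
--     out.extend(split_latex_top_level(latex[i + 1:]))
--     return out
-- ===== Notes on version B (the rewrite author's own statement) =====
-- stated objective: alternative
-- what changed: Replaces A's single fold with a parts/current/depth accumulator state by a recursive splitter: a helper finds the index of the first top-level operator, the head slice is stripped and emitted, and the function recurses on the suffix after the operator.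
import Mathlib
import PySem

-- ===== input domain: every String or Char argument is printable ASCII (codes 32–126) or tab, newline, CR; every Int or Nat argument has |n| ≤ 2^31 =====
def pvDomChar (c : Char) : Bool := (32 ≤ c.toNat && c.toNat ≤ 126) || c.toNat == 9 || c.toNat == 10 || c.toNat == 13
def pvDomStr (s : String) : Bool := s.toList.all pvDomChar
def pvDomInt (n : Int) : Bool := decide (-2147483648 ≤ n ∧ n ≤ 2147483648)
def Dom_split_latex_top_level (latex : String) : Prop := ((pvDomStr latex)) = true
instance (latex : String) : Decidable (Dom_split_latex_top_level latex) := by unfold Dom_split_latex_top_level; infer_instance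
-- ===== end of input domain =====

-- B replaces A's one-pass accumulator fold with find-first-operator + slice + recursion (objective: alternative decomposition).

-- ===== PORT A =====
-- A's for-loop over the characters, state (parts, current, depth), transcribed as structural recursion.
def aLoop : List Char → List String → List Char → Int → List String × List Char × Int
  | [], parts, cur, d => (parts, cur, d)
  | c :: t, parts, cur, d =>
    if c = '{' then aLoop t parts (cur ++ [c]) (d + 1)
    else if c = '}' then aLoop t parts (cur ++ [c]) (d - 1)
    else if d = 0 ∧ (c = '=' ∨ c = '+') then
      let text := PySem.Chars.strip cur
      aLoop t ((if text ≠ [] then parts ++ [String.mk text] else parts) ++ [String.mk [c]]) [] d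
    else aLoop t parts (cur ++ [c]) d

def split_latex_top_level (latex : String) : List String :=
  let st := aLoop latex.toList [] [] 0
  let text := PySem.Chars.strip st.2.1
  if text ≠ [] then st.1 ++ [String.mk text] else st.1

-- ===== PORT B =====
-- _first_top_level_op: index of the first '=' or '+' at brace depth 0, or none.
def firstOp : List Char → Int → Option Nat
  | [], _ => none
  | c :: t, d =>
    if c = '{' then (firstOp t (d + 1)).map (· + 1)
    else if c = '}' then (firstOp t (d - 1)).map (· + 1)
    else if d = 0 ∧ (c = '=' ∨ c = '+') then some 0
    else (firstOp t d).map (· + 1)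

theorem firstOp_lt {l : List Char} {d : Int} {i : Nat} (h : firstOp l d = some i) :
    i < l.length := by
  induction l generalizing d i with
  | nil => simp [firstOp] at h
  | cons c t ih =>
    simp only [firstOp] at h
    split_ifs at h <;>
      first
        | (simp only [Option.map_eq_some_iff] at h
           obtain ⟨j, hj, rfl⟩ := h
           have := ih hj
           simp; omega)
        | (simp_all; omega)

-- split_latex_top_level from Source B: slice at the first top-level operator and recurse on the suffix.
def altGo (l : List Char) : List String :=
  match h : firstOp l 0 with
  | none =>
    let t := PySem.Chars.strip l
    if t = [] then [] else [String.mk t]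
  | some i =>
    (let hd := PySem.Chars.strip (l.take i)
     if hd = [] then [] else [String.mk hd])
      ++ [String.mk [l[i]!]] ++ altGo (l.drop (i + 1))
termination_by l.length
decreasing_by
  have := firstOp_lt h
  simp [List.length_drop]; omega

def split_latex_top_level_alt (latex : String) : List String := altGo latex.toList

-- ===== PRECONDITION & SPEC =====
def Spec_split_latex_top_level (latex : String) (out : List String) : Prop := out = split_latex_top_level_alt latex
instance (latex : String) (out : List String) : Decidable (Spec_split_latex_top_level latex out) := by unfold Spec_split_latex_top_level; infer_instance

-- ===== CLAIM (what is proved, stated in full; the proofs are below) =====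
def Claim_equal_split_latex_top_level : Prop := ∀ (latex : String), Dom_split_latex_top_level latex → Spec_split_latex_top_level latex (split_latex_top_level latex)

-- ===== LEMMAS AND PROOFS =====

-- flush of a segment, as a (possibly empty) part list
def flushPart (cs : List Char) : List String :=
  if PySem.Chars.strip cs ≠ [] then [String.mk (PySem.Chars.strip cs)] else []

-- A's loop followed by the final flush
def runA (l : List Char) (parts : List String) (cur : List Char) (d : Int) : List String :=
  let st := aLoop l parts cur d
  if PySem.Chars.strip st.2.1 ≠ [] then st.1 ++ [String.mk (PySem.Chars.strip st.2.1)] else st.1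

-- what B computes from an arbitrary carried prefix cur and depth d
def bView (cur : List Char) (d : Int) (l : List Char) : List String :=
  match firstOp l d with
  | none => flushPart (cur ++ l)
  | some i => flushPart (cur ++ l.take i) ++ [String.mk [l[i]!]] ++ altGo (l.drop (i + 1))

theorem runA_parts (l : List Char) (parts : List String) (cur : List Char) (d : Int) :
    runA l parts cur d = parts ++ runA l [] cur d := by
  induction l generalizing parts cur d with
  | nil => simp only [runA, aLoop]; split <;> simp
  | cons c t ih =>
    by_cases h1 : c = '{'
    · have hl : ∀ P, runA (c :: t) P cur d = runA t P (cur ++ [c]) (d + 1) := fun P => by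
        simp [runA, aLoop, h1]
      rw [hl, hl, ih]
    · by_cases h2 : c = '}'
      · have hl : ∀ P, runA (c :: t) P cur d = runA t P (cur ++ [c]) (d - 1) := fun P => by
          simp [runA, aLoop, h1, h2]
        rw [hl, hl, ih]
      · by_cases h3 : d = 0 ∧ (c = '=' ∨ c = '+')
        · have hl : ∀ P, runA (c :: t) P cur d =
              runA t ((if PySem.Chars.strip cur ≠ [] then P ++ [String.mk (PySem.Chars.strip cur)] else P) ++ [String.mk [c]]) [] d := fun P => by
            simp [runA, aLoop, h1, h2, h3]
          rw [hl, hl, ih,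
            ih (parts := (if PySem.Chars.strip cur ≠ [] then [] ++ [String.mk (PySem.Chars.strip cur)] else []) ++ [String.mk [c]])]
          split <;> simp
        · have hl : ∀ P, runA (c :: t) P cur d = runA t P (cur ++ [c]) d := fun P => by
            simp [runA, aLoop, h1, h2, h3]
          rw [hl, hl, ih]

theorem altGo_eq_bView (l : List Char) : altGo l = bView [] 0 l := by
  rw [altGo, bView]
  cases h : firstOp l 0 <;> simp [flushPart]

theorem runA_eq_bView (l : List Char) (cur : List Char) (d : Int) :
    runA l [] cur d = bView cur d l := by
  induction l generalizing cur d with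
  | nil => simp [runA, aLoop, bView, firstOp, flushPart]
  | cons c t ih =>
    by_cases h1 : c = '{'
    · have hl : runA (c :: t) [] cur d = runA t [] (cur ++ [c]) (d + 1) := by
        simp [runA, aLoop, h1]
      rw [hl, ih]
      simp only [bView, firstOp, h1, if_pos rfl]
      cases hf : firstOp t (d + 1) with
      | none => simp [h1]
      | some i => simp [h1, List.take_succ_cons, List.drop_succ_cons]
    · by_cases h2 : c = '}'
      · have hl : runA (c :: t) [] cur d = runA t [] (cur ++ [c]) (d - 1) := by
          simp [runA, aLoop, h1, h2]
        rw [hl, ih]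
        simp only [bView, firstOp, h1, h2, if_neg h1, if_pos rfl]
        cases hf : firstOp t (d - 1) with
        | none => simp [h2]
        | some i => simp [h2, List.take_succ_cons, List.drop_succ_cons]
      · by_cases h3 : d = 0 ∧ (c = '=' ∨ c = '+')
        · have hl : runA (c :: t) [] cur d =
              runA t ((if PySem.Chars.strip cur ≠ [] then [] ++ [String.mk (PySem.Chars.strip cur)] else []) ++ [String.mk [c]]) [] d := by
            simp [runA, aLoop, h1, h2, h3]
          rw [hl, runA_parts, ih, h3.1, ← altGo_eq_bView]
          simp [bView, firstOp, h1, h2, h3.2, flushPart]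
        · have hl : runA (c :: t) [] cur d = runA t [] (cur ++ [c]) d := by
            simp [runA, aLoop, h1, h2, h3]
          rw [hl, ih]
          simp only [bView, firstOp, if_neg h1, if_neg h2, if_neg h3]
          cases hf : firstOp t d with
          | none => simp
          | some i => simp [List.take_succ_cons, List.drop_succ_cons]

-- ===== VERDICT (by name: the statement is the Claim_ definition above) =====
theorem split_latex_top_level_spec : Claim_equal_split_latex_top_level := by
  intro latex _
  show split_latex_top_level latex = split_latex_top_level_alt latex
  have : split_latex_top_level latex = runA latex.toList [] [] 0 := rfl
  rw [this, runA_eq_bView, ← altGo_eq_bView]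
  rfl
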